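-- pv_equiv track=rewrite | github.com/padresmurfa/yapl | v4/lexer/shared/tokenized_lines/builder.py | infix_mathematical_operator
-- ===== SOURCE A (Python) =====
-- def _specific_symbol(o, logical_line_contents, tokens, token_name):
--     if logical_line_contents.startswith(o):
--         logical_line_contents = logical_line_contents[len(o):]
--         tokens.append({
--             "token": token_name,
--             "value": o
--         })
--     return logical_line_contents
--
-- def infix_mathematical_operator(logical_line_contents, tokens):
--     for o in (
--             "+", "-", "/", "*",
--     ):
--         before = logical_line_contents
--         after = _specific_symbol(o, logical_line_contents, tokens, "INFIX_MATHEMATICAL_OPERATOR")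
--         if before != after:
--             return after
--     return logical_line_contents
-- ===== SOURCE B (Python) =====
-- def infix_mathematical_operator(logical_line_contents, tokens):
--     head = logical_line_contents[:1]
--     cut = len(head) - len(head.strip("+-/*"))
--     op, rest = logical_line_contents[:cut], logical_line_contents[cut:]
--     if op:
--         tokens.append({"token": "INFIX_MATHEMATICAL_OPERATOR", "value": op})
--     return rest
-- ===== Notes on version B (the rewrite author's own statement) =====
-- stated objective: alternative
-- what changed: Replaces A's per-candidate scan-and-strip loop (helper + before/after comparison per operator) by a split-point computation: the cut length (0 or 1) is derived arithmetically from strip('+-/*') of the first character, and the string is split once at that point with the token emitted from the cut-off prefix.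
import Mathlib
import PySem

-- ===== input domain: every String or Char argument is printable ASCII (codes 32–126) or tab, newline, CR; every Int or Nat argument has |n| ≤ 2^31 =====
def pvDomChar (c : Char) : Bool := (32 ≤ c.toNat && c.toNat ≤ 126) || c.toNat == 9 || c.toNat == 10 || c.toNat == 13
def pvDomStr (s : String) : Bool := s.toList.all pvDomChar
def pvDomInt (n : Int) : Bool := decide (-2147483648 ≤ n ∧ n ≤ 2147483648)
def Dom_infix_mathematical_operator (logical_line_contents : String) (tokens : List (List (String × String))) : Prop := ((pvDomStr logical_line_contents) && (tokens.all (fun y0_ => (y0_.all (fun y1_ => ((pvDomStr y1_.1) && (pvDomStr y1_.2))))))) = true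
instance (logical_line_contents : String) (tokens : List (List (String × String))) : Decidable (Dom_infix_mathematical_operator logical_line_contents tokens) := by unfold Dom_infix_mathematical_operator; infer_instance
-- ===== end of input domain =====

-- B replaces A's per-candidate scan-and-strip loop by a split-point computation: the cut
-- length (0 or 1) is derived arithmetically from strip('+-/*') of the first character and
-- the string is split once at that point (objective: alternative decomposition).
-- Both Pythons also append a token dict to `tokens` on a match (same mutation in A and B);
-- the equivalence proved here is about the RETURN value.

-- ===== PORT A =====
-- helper _specific_symbol: only its returned string matters for the return value of A
def pv_specific_symbol (o : String) (logical_line_contents : String) : String :=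
  if PySem.Str.startswith logical_line_contents o then
    PySem.Str.slice logical_line_contents (some (o.toList.length : Int)) none
  else
    logical_line_contents

def infix_mathematical_operator (logical_line_contents : String) (tokens : List (List (String × String))) : String :=
  -- the for-loop with early return, as a fold carrying the early-return value
  match ["+", "-", "/", "*"].foldl
      (fun acc o =>
        match acc with
        | some r => some r
        | none =>
          let before := logical_line_contents
          let after := pv_specific_symbol o logical_line_contents
          if before ≠ after then some after else none)
      none with
  | some r => r
  | none => logical_line_contents

-- ===== PORT B =====
-- Source B line by line; `op` and the `if op:` branch only mutate `tokens`, so the returned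
-- value is `rest` in either branch.
def infix_mathematical_operator_alt (logical_line_contents : String) (tokens : List (List (String × String))) : String :=
  let head := PySem.Str.slice logical_line_contents none (some 1)
  let cut : Int := PySem.Str.len head - PySem.Str.len (PySem.Str.stripChars head "+-/*")
  let rest := PySem.Str.slice logical_line_contents (some cut) none
  rest

-- ===== PRECONDITION & SPEC =====
def Spec_infix_mathematical_operator (logical_line_contents : String) (tokens : List (List (String × String))) (out : String) : Prop := out = infix_mathematical_operator_alt logical_line_contents tokens
instance (logical_line_contents : String) (tokens : List (List (String × String))) (out : String) : Decidable (Spec_infix_mathematical_operator logical_line_contents tokens out) := by unfold Spec_infix_mathematical_operator; infer_instance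

-- ===== CLAIM =====
def Claim_equal_infix_mathematical_operator : Prop := ∀ (logical_line_contents : String) (tokens : List (List (String × String))), Dom_infix_mathematical_operator logical_line_contents tokens → Spec_infix_mathematical_operator logical_line_contents tokens (infix_mathematical_operator logical_line_contents tokens)

-- ===== LEMMAS AND PROOFS =====
theorem pv_take1 (cs : List Char) (d : Char) : [d] <+: cs ↔ cs.take 1 = [d] := by
  cases cs with
  | nil => simp
  | cons c r => simp [List.cons_prefix_cons, eq_comm]

theorem pv_sw (l : String) (d : Char) :
    PySem.Chars.startswith l.toList [d] = true ↔ l.toList.take 1 = [d] := by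
  rw [PySem.Chars.startswith_iff, pv_take1]

theorem pv_ne_tail (l : String) (h : l.toList.take 1 ≠ []) :
    ¬ l = PySem.Str.slice l (some 1) none := by
  intro he
  have := congrArg (fun s => s.toList.length) he
  simp only [PySem.Str.toList_slice, PySem.Chars.slice_eq_listSlice,
    PySem.List.slice_from_one, List.length_tail] at this
  cases hc : l.toList with
  | nil => exact h (by simp [hc])
  | cons c r => rw [hc] at this; simp at this

-- A's loop, characterised: strip the first character iff it is one of the four operators
theorem pv_A_eq (l : String) (t : List (List (String × String))) :
    infix_mathematical_operator l t =
      if l.toList.take 1 ∈ [['+'], ['-'], ['/'], ['*']] then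
        PySem.Str.slice l (some 1) none
      else l := by
  unfold infix_mathematical_operator pv_specific_symbol
  simp only [List.foldl, List.mem_cons, List.not_mem_nil, or_false]
  by_cases h1 : l.toList.take 1 = ['+']
  · have s1 := (pv_sw l '+').mpr h1
    have ne1 := pv_ne_tail l (by rw [h1]; simp)
    simp [s1, ne1, h1]
  · have s1 := (pv_sw l '+').not.mpr h1
    simp only [Bool.not_eq_true] at s1
    by_cases h2 : l.toList.take 1 = ['-']
    · have s2 := (pv_sw l '-').mpr h2
      have ne2 := pv_ne_tail l (by rw [h2]; simp)
      simp [s1, s2, ne2, h2]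
    · have s2 := (pv_sw l '-').not.mpr h2
      simp only [Bool.not_eq_true] at s2
      by_cases h3 : l.toList.take 1 = ['/']
      · have s3 := (pv_sw l '/').mpr h3
        have ne3 := pv_ne_tail l (by rw [h3]; simp)
        simp [s1, s2, s3, ne3, h3]
      · have s3 := (pv_sw l '/').not.mpr h3
        simp only [Bool.not_eq_true] at s3
        by_cases h4 : l.toList.take 1 = ['*']
        · have s4 := (pv_sw l '*').mpr h4
          have ne4 := pv_ne_tail l (by rw [h4]; simp)
          simp [s1, s2, s3, s4, ne4, h4]
        · have s4 := (pv_sw l '*').not.mpr h4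
          simp only [Bool.not_eq_true] at s4
          simp [s1, s2, s3, s4, h1, h2, h3, h4]

theorem pv_strip_single (c : Char) (chars : List Char) :
    PySem.Chars.stripChars [c] chars = if chars.contains c then [] else [c] := by
  unfold PySem.Chars.stripChars
  by_cases h : c ∈ chars
  · simp [List.dropWhile, h]
  · simp [List.dropWhile, h]

theorem pv_key (l : String) (t : List (List (String × String))) :
    infix_mathematical_operator l t = infix_mathematical_operator_alt l t := by
  rw [pv_A_eq]
  unfold infix_mathematical_operator_alt
  show _ = PySem.Str.slice l
      (some (PySem.Str.len (PySem.Str.slice l none (some 1))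
        - PySem.Str.len (PySem.Str.stripChars (PySem.Str.slice l none (some 1)) "+-/*"))) none
  have hhead : (PySem.Str.slice l none (some 1)).toList = l.toList.take 1 := by
    have h1 : (1 : Int) = ((1 : Nat) : Int) := rfl
    rw [PySem.Str.toList_slice, PySem.Chars.slice_eq_listSlice, h1,
      PySem.List.slice_to_natCast]
  have hfrom0 : PySem.Str.slice l (some 0) none = l := by
    rw [← String.toList_inj, PySem.Str.toList_slice, PySem.Chars.slice_eq_listSlice]
    have h0' : ((0 : Nat) : Int) = (0 : Int) := rfl
    rw [← h0', PySem.List.slice_from_natCast]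
    simp
  cases hc : l.toList with
  | nil =>
    have hl : l = "" := String.toList_inj.mp (by rw [hc]; rfl)
    subst hl
    rfl
  | cons c r =>
    rw [hc] at hhead
    simp only [List.take_succ_cons, List.take_zero] at hhead ⊢
    have hlen1 : PySem.Str.len (PySem.Str.slice l none (some 1)) = 1 := by
      simp [PySem.Str.len, hhead]
    have hstrip : (PySem.Str.stripChars (PySem.Str.slice l none (some 1)) "+-/*").toList
        = if ("+-/*".toList).contains c then [] else [c] := by
      rw [PySem.Str.toList_stripChars, hhead, pv_strip_single]
    by_cases hop : ("+-/*".toList).contains c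
    · have hop' : c = '+' ∨ c = '-' ∨ c = '/' ∨ c = '*' := by
        have h := (List.contains_iff_mem).mp hop
        simpa using h
      have hmem : [c] ∈ [['+'], ['-'], ['/'], ['*']] := by
        rcases hop' with h | h | h | h <;> subst h <;> decide
      rw [if_pos hmem]
      have hlen0 : PySem.Str.len (PySem.Str.stripChars (PySem.Str.slice l none (some 1)) "+-/*") = 0 := by
        simp only [PySem.Str.len, hstrip, if_pos hop]
        rfl
      rw [hlen1, hlen0]
      norm_num
    · have hop' : ¬ (c = '+' ∨ c = '-' ∨ c = '/' ∨ c = '*') := by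
        intro h
        apply hop
        rw [List.contains_iff_mem]
        rcases h with h | h | h | h <;> subst h <;> decide
      have hmem : [c] ∉ [['+'], ['-'], ['/'], ['*']] := by
        intro hm
        apply hop'
        simpa using hm
      rw [if_neg hmem]
      have hlenS : PySem.Str.len (PySem.Str.stripChars (PySem.Str.slice l none (some 1)) "+-/*") = 1 := by
        simp only [PySem.Str.len, hstrip, if_neg hop]
        rfl
      rw [hlen1, hlenS]
      simpa using hfrom0.symm

-- ===== VERDICT =====
theorem infix_mathematical_operator_spec : Claim_equal_infix_mathematical_operator := by
  intro l t _
  exact (pv_key l t).symm ▸ rfl
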